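-- pv_equiv track=rewrite | github.com/ESHackathon/search_parser | parser_util.py | merge_terms
-- ===== SOURCE A (Python) =====
-- def merge_terms(parse_query):
--     parse_query_joined = []
--     new_terms = []
--     for term, type_ in parse_query:
--         if type_ == "TERM":
--             new_terms.append(term)
--         else:
--             if len(new_terms) > 0:
--                 parse_query_joined.append(
--                     (
--                         " ".join(new_terms),
--                         "TERM"
--                     )
--                 )
--                 new_terms = []
--             parse_query_joined.append((term, type_))
--     if len(new_terms) > 0:
--         parse_query_joined.append(
--             (
--                 " ".join(new_terms),
--                 "TERM"
--             )
--         )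
--     return parse_query_joined
-- ===== SOURCE B (Python) =====
-- def merge_terms(parse_query):
--     # Run-based grouping: find each maximal run of TERM tokens and join it at once.
--     out = []
--     i = 0
--     n = len(parse_query)
--     while i < n:
--         if parse_query[i][1] == "TERM":
--             j = i
--             while j < n and parse_query[j][1] == "TERM":
--                 j += 1
--             out.append((" ".join(t for t, _ in parse_query[i:j]), "TERM"))
--             i = j
--         else:
--             out.append(parse_query[i])
--             i += 1
--     return out
-- ===== Notes on version B (the rewrite author's own statement) =====
-- stated objective: alternative
-- what changed: Replaces A's state machine (pending-terms accumulator flushed on each non-TERM token and at the end) by run-based grouping: scan to the end of each maximal TERM run and emit the joined run in one step, so no pending buffer or end-of-loop flush exists.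
import Mathlib
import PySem

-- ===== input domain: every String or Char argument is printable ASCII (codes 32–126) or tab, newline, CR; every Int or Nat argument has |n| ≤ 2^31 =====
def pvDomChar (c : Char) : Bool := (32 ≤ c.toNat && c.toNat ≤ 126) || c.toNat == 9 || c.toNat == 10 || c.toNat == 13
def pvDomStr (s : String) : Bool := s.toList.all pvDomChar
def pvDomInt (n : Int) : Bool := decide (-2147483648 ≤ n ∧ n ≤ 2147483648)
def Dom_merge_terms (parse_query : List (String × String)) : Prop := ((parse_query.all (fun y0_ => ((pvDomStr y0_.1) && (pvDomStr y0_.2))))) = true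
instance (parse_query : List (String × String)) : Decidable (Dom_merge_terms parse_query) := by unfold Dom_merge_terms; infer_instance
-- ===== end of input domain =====

-- B replaces A's pending-buffer state machine with run-based grouping (same result, same cost).

-- ===== PORT A =====
-- A: fold over the tokens with state (parse_query_joined, new_terms); flush new_terms
-- on each non-TERM token and once more after the loop.
def merge_terms (parse_query : List (String × String)) : List (String × String) :=
  let st := parse_query.foldl
    (fun (st : List (String × String) × List String) p =>
      if p.2 == "TERM" then (st.1, st.2 ++ [p.1])
      else if st.2.length > 0 then
        (st.1 ++ [(PySem.Str.join " " st.2, "TERM"), (p.1, p.2)], [])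
      else (st.1 ++ [(p.1, p.2)], []))
    ([], [])
  if st.2.length > 0 then st.1 ++ [(PySem.Str.join " " st.2, "TERM")] else st.1

-- ===== PORT B =====
-- B: on a TERM token, take the whole maximal TERM run, emit it joined, recurse on the rest.
def merge_terms_alt (parse_query : List (String × String)) : List (String × String) :=
  match parse_query with
  | [] => []
  | p :: rest =>
    if p.2 == "TERM" then
      let run := p :: rest.takeWhile (fun q => q.2 == "TERM")
      (PySem.Str.join " " (run.map Prod.fst), "TERM")
        :: merge_terms_alt (rest.dropWhile (fun q => q.2 == "TERM"))
    else p :: merge_terms_alt rest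
termination_by parse_query.length
decreasing_by
  · exact Nat.lt_succ_of_le (List.length_dropWhile_le _ _)
  · simp

-- ===== PRECONDITION & SPEC =====
def Spec_merge_terms (parse_query : List (String × String)) (out : List (String × String)) : Prop := out = merge_terms_alt parse_query
instance (parse_query : List (String × String)) (out : List (String × String)) : Decidable (Spec_merge_terms parse_query out) := by unfold Spec_merge_terms; infer_instance

-- ===== CLAIM (what is proved, stated in full; the proofs are below) =====
def Claim_equal_merge_terms : Prop := ∀ (parse_query : List (String × String)), Dom_merge_terms parse_query → Spec_merge_terms parse_query (merge_terms parse_query)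

-- ===== LEMMAS AND PROOFS =====

-- the step function of A's fold, named for the lemmas
def mtStep (st : List (String × String) × List String) (p : String × String) :
    List (String × String) × List String :=
  if p.2 == "TERM" then (st.1, st.2 ++ [p.1])
  else if st.2.length > 0 then
    (st.1 ++ [(PySem.Str.join " " st.2, "TERM"), (p.1, p.2)], [])
  else (st.1 ++ [(p.1, p.2)], [])

def mtFlush (st : List (String × String) × List String) : List (String × String) :=
  if st.2.length > 0 then st.1 ++ [(PySem.Str.join " " st.2, "TERM")] else st.1

theorem merge_terms_eq_flush (pq : List (String × String)) :
    merge_terms pq = mtFlush (pq.foldl mtStep ([], [])) := rfl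

theorem alt_nil : merge_terms_alt [] = [] := by
  rw [merge_terms_alt.eq_def]

theorem alt_cons_nonterm (p : String × String) (pq : List (String × String))
    (h : ¬ p.2 = "TERM") : merge_terms_alt (p :: pq) = p :: merge_terms_alt pq := by
  conv_lhs => rw [merge_terms_alt.eq_def]
  simp [h]

-- B on an all-TERM prefix followed by pq, vs A's state (acc, ts)
theorem alt_term_prefix (ts : List String) (pq : List (String × String)) (h : ts ≠ []) :
    merge_terms_alt (ts.map (fun t => (t, "TERM")) ++ pq)
      = (PySem.Str.join " "
           (ts ++ (List.takeWhile (fun q => q.2 == "TERM") pq).map Prod.fst),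
         "TERM") :: merge_terms_alt (List.dropWhile (fun q => q.2 == "TERM") pq) := by
  cases ts with
  | nil => exact absurd rfl h
  | cons t ts =>
    show merge_terms_alt ((t, "TERM") :: (ts.map (fun t => (t, "TERM")) ++ pq)) = _
    conv_lhs => rw [merge_terms_alt.eq_def]
    simp [Function.comp_def]

-- the main invariant: running A's loop from state (acc, ts) equals acc ++ B on ts (as TERM tokens) ++ pq
theorem loop_invariant (pq : List (String × String)) :
    ∀ (acc : List (String × String)) (ts : List String),
    mtFlush (pq.foldl mtStep (acc, ts))
      = acc ++ merge_terms_alt (ts.map (fun t => (t, "TERM")) ++ pq) := by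
  induction pq with
  | nil =>
    intro acc ts
    cases ts with
    | nil => simp [mtFlush, alt_nil]
    | cons t ts =>
      rw [alt_term_prefix _ _ (by simp)]
      simp [mtFlush, alt_nil, List.takeWhile, List.dropWhile]
  | cons p pq ih =>
    intro acc ts
    by_cases hT : p.2 = "TERM"
    · have hs : mtStep (acc, ts) p = (acc, ts ++ [p.1]) := by simp [mtStep, hT]
      rw [List.foldl_cons, hs, ih]
      congr 1
      have : (ts ++ [p.1]).map (fun t => (t, "TERM")) ++ pq
           = ts.map (fun t => (t, "TERM")) ++ p :: pq := by
        simp [← hT]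
      rw [this]
    · have hb : (p.2 == "TERM") = false := beq_eq_false_iff_ne.mpr hT
      have htw : List.takeWhile (fun q => q.2 == "TERM") (p :: pq) = [] := by
        simp [List.takeWhile, hb]
      have hdw : List.dropWhile (fun q => q.2 == "TERM") (p :: pq) = p :: pq := by
        simp [List.dropWhile, hb]
      cases ts with
      | nil =>
        have hs : mtStep (acc, []) p = (acc ++ [(p.1, p.2)], []) := by
          simp [mtStep, hT]
        rw [List.foldl_cons, hs, ih]
        simp [alt_cons_nonterm p pq hT]
      | cons t ts =>
        have hs : mtStep (acc, t :: ts) p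
             = (acc ++ [(PySem.Str.join " " (t :: ts), "TERM"), (p.1, p.2)], []) := by
          simp [mtStep, hT]
        rw [List.foldl_cons, hs, ih]
        rw [alt_term_prefix (t :: ts) (p :: pq) (by simp), htw, hdw,
          alt_cons_nonterm p pq hT]
        simp

-- ===== VERDICT (by name: the statement is the Claim_ definition above) =====
theorem merge_terms_spec : Claim_equal_merge_terms := by
  intro pq _
  show merge_terms pq = merge_terms_alt pq
  rw [merge_terms_eq_flush, loop_invariant pq [] []]
  simp
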